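-- pv_equiv track=rewrite | github.com/haisimao/anPingworkSpace | DOWN/td_gz_guizhou/script/IntegrationSpider/SpiderTools/Tool.py | deal_text
-- ===== SOURCE A (Python) =====
-- def deal_text(s):
--     '''把文本的换行等换成|，其它的去掉
--     :param str:
--     :return:
--     '''
--     regular = ['\xa0', '\u3000', '\t', ' ']
--     huiche = ['\n','\r','\r\n','\n\r']
--     special = [{'code':'"','expr':'\\"'}]
--     for r in huiche:
--         s = s.replace(r,'|')
--     for r in regular:
--         s = s.replace(r,'')
--     for r in special:
--         str = s.replace(r['code'], r['expr'])
--     s = s.strip()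
--     return s
-- ===== SOURCE B (Python) =====
-- def deal_text(s):
--     '''One pass over the characters: each '\n'/'\r' becomes '|', the listed
--     blank chars are dropped, everything else is kept; then a final strip.'''
--     out = []
--     for ch in s:
--         if ch == '\n' or ch == '\r':
--             out.append('|')
--         elif ch == '\xa0' or ch == '\u3000' or ch == '\t' or ch == ' ':
--             pass
--         else:
--             out.append(ch)
--     return ''.join(out).strip()
-- ===== Notes on version B (the rewrite author's own statement) =====
-- stated objective: simpler
-- what changed: Replaces A's six sequential whole-string .replace passes (plus a dead 'special' loop) by a single per-character pass that appends '|' for newline chars, drops the blank chars and keeps the rest, joined and stripped once.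
import Mathlib
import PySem

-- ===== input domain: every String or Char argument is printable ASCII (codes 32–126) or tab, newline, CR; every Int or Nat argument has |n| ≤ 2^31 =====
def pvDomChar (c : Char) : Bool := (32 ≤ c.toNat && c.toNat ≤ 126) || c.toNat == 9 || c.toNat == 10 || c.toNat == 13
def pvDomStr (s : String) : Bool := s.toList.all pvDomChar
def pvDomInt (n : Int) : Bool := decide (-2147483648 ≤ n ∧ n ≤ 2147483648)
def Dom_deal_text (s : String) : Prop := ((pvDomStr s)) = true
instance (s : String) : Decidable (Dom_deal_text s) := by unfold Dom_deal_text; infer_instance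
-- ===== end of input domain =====

-- B replaces A's six sequential whole-string .replace passes (and a dead 'special' loop)
-- by one per-character pass ('\n'/'\r' → '|', blanks dropped, rest kept) joined and
-- stripped once; objective: simpler.

-- ===== PORT A =====
def deal_text (s : String) : String :=
  let regular : List String := ["\u00A0", "\u3000", "\t", " "]
  let huiche : List String := ["\n", "\r", "\r\n", "\n\r"]
  let s1 := huiche.foldl (fun acc r => PySem.Str.replace acc r "|") s
  let s2 := regular.foldl (fun acc r => PySem.Str.replace acc r "") s1
  -- the 'special' loop only assigns an unused local variable 'str'; it never changes s
  PySem.Str.strip s2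

-- ===== PORT B =====
def deal_text_alt (s : String) : String :=
  let out := s.toList.foldl (fun acc ch =>
    if ch = '\n' ∨ ch = '\r' then acc ++ ['|']
    else if ch = '\u00A0' ∨ ch = '\u3000' ∨ ch = '\t' ∨ ch = ' ' then acc
    else acc ++ [ch]) []
  PySem.Str.strip (String.ofList out)

-- ===== PRECONDITION & SPEC =====
def Spec_deal_text (s : String) (out : String) : Prop := out = deal_text_alt s
instance (s : String) (out : String) : Decidable (Spec_deal_text s out) := by unfold Spec_deal_text; infer_instance

-- ===== CLAIM (what is proved, stated in full; the proofs are below) =====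
def Claim_equal_deal_text : Prop := ∀ (s : String), Dom_deal_text s → Spec_deal_text s (deal_text s)

-- ===== LEMMAS AND PROOFS =====

-- replace with a single-character pattern is a per-character flatMap
theorem pv_go_single (c : Char) (new : List Char) :
    ∀ fuel l acc, l.length ≤ fuel →
      PySem.Chars.replace.go [c] new fuel l acc
        = acc.reverse ++ l.flatMap (fun x => if x = c then new else [x]) := by
  intro fuel
  induction fuel with
  | zero =>
    intro l acc h
    have : l = [] := List.eq_nil_of_length_eq_zero (Nat.le_zero.mp h)
    subst this; simp [PySem.Chars.replace.go]
  | succ n ih =>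
    intro l acc h
    cases l with
    | nil => simp [PySem.Chars.replace.go]
    | cons x t =>
      by_cases hx : x = c
      · subst hx
        have hp : List.isPrefixOf [x] (x :: t) = true := by
          simp [List.isPrefixOf]
        simp only [PySem.Chars.replace.go, hp, if_pos]
        rw [show List.drop [x].length (x :: t) = t from rfl]
        rw [ih t (new.reverse ++ acc) (by simpa using Nat.lt_succ_iff.mp (by simpa using h))]
        simp
      · have hp : List.isPrefixOf [c] (x :: t) = false := by
          simp [List.isPrefixOf]
          exact fun e => absurd e.symm hx
        simp only [PySem.Chars.replace.go, hp, if_neg, Bool.false_eq_true, not_false_iff]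
        rw [ih t (x :: acc) (by simpa using Nat.lt_succ_iff.mp (by simpa using h))]
        simp [hx]

theorem pv_replace_single (l : List Char) (c : Char) (new : List Char) :
    PySem.Chars.replace l [c] new = l.flatMap (fun x => if x = c then new else [x]) := by
  simpa [PySem.Chars.replace] using pv_go_single c new l.length l [] le_rfl

-- a pattern whose first character is absent from the string leaves it unchanged
theorem pv_go_nomatch (a : Char) (rest new : List Char) :
    ∀ fuel l acc, l.length ≤ fuel → a ∉ l →
      PySem.Chars.replace.go (a :: rest) new fuel l acc = acc.reverse ++ l := by
  intro fuel
  induction fuel with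
  | zero =>
    intro l acc h _
    have : l = [] := List.eq_nil_of_length_eq_zero (Nat.le_zero.mp h)
    subst this; simp [PySem.Chars.replace.go]
  | succ n ih =>
    intro l acc h hmem
    cases l with
    | nil => simp [PySem.Chars.replace.go]
    | cons x t =>
      have hx : x ≠ a := fun e => hmem (by simp [e])
      have hp : List.isPrefixOf (a :: rest) (x :: t) = false := by
        simp [List.isPrefixOf]
        exact fun e => absurd e.symm hx
      simp only [PySem.Chars.replace.go, hp, Bool.false_eq_true, not_false_iff, if_neg]
      rw [ih t (x :: acc) (by simpa using Nat.lt_succ_iff.mp (by simpa using h))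
            (fun hm => hmem (by simp [hm]))]
      simp

theorem pv_replace_nomatch (l : List Char) (a : Char) (rest new : List Char)
    (hmem : a ∉ l) :
    PySem.Chars.replace l (a :: rest) new = l := by
  simpa [PySem.Chars.replace] using pv_go_nomatch a rest new l.length l [] le_rfl hmem

-- the per-character map of B
def pvPiece (ch : Char) : List Char :=
  if ch = '\n' ∨ ch = '\r' then ['|']
  else if ch = '\u00A0' ∨ ch = '\u3000' ∨ ch = '\t' ∨ ch = ' ' then []
  else [ch]

-- B's append loop accumulates exactly the flatMap of pvPiece
theorem pv_alt_foldl (l : List Char) :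
    (l.foldl (fun acc ch =>
      if ch = '\n' ∨ ch = '\r' then acc ++ ['|']
      else if ch = '\u00A0' ∨ ch = '\u3000' ∨ ch = '\t' ∨ ch = ' ' then acc
      else acc ++ [ch]) ([] : List Char)) = l.flatMap pvPiece := by
  have h : ∀ acc : List Char,
      l.foldl (fun acc ch =>
        if ch = '\n' ∨ ch = '\r' then acc ++ ['|']
        else if ch = '\u00A0' ∨ ch = '\u3000' ∨ ch = '\t' ∨ ch = ' ' then acc
        else acc ++ [ch]) acc = acc ++ l.flatMap pvPiece := by
    induction l with
    | nil => simp
    | cons x t ih =>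
      intro acc
      simp only [List.foldl_cons, List.flatMap_cons]
      rw [ih]
      unfold pvPiece
      split_ifs <;> simp
  simpa using h []

-- after mapping '\n' and then '\r' to '|', neither newline character remains
theorem pv_no_nl (l : List Char) (c : Char) (hc : c = '\n' ∨ c = '\r') :
    c ∉ (l.flatMap (fun x => if x = '\n' then ['|'] else [x])).flatMap
          (fun x => if x = '\r' then ['|'] else [x]) := by
  intro hmem
  rcases List.mem_flatMap.mp hmem with ⟨y, hy, hxy⟩
  by_cases hyr : y = '\r'
  · rw [if_pos hyr] at hxy
    simp only [List.mem_singleton] at hxy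
    subst hxy
    rcases hc with h | h <;> exact absurd h (by decide)
  · rw [if_neg hyr] at hxy
    simp only [List.mem_singleton] at hxy
    subst hxy
    rcases List.mem_flatMap.mp hy with ⟨z, hz, hzy⟩
    by_cases hzn : z = '\n'
    · rw [if_pos hzn] at hzy
      simp only [List.mem_singleton] at hzy
      subst hzy
      rcases hc with h | h <;> exact absurd h (by decide)
    · rw [if_neg hzn] at hzy
      simp only [List.mem_singleton] at hzy
      subst hzy
      rcases hc with rfl | rfl
      · exact hzn rfl
      · exact hyr rfl

-- A's six effective substitutions compose into one flatMap of pvPiece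
theorem pv_chain (l : List Char) :
    PySem.Chars.replace (PySem.Chars.replace (PySem.Chars.replace (PySem.Chars.replace
      (PySem.Chars.replace (PySem.Chars.replace (PySem.Chars.replace (PySem.Chars.replace
        l ['\n'] ['|']) ['\r'] ['|']) ['\r', '\n'] ['|']) ['\n', '\r'] ['|'])
      ['\u00A0'] []) ['\u3000'] []) ['\t'] []) [' '] []
    = l.flatMap pvPiece := by
  simp only [pv_replace_single]
  rw [pv_replace_nomatch _ '\r' ['\n'] _ (pv_no_nl l '\r' (Or.inr rfl))]
  rw [pv_replace_nomatch _ '\n' ['\r'] _ (pv_no_nl l '\n' (Or.inl rfl))]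
  simp only [List.flatMap_assoc]
  refine congrArg (fun f => List.flatMap f l) (funext fun x => ?_)
  unfold pvPiece
  by_cases h1 : x = '\n' <;> by_cases h2 : x = '\r' <;>
    by_cases h3 : x = '\u00A0' <;> by_cases h4 : x = '\u3000' <;>
    by_cases h5 : x = '\t' <;> by_cases h6 : x = ' ' <;>
    simp_all

-- ===== VERDICT (by name: the statement is the Claim_ definition above) =====
theorem deal_text_spec : Claim_equal_deal_text := by
  intro s _
  show deal_text s = deal_text_alt s
  unfold deal_text deal_text_alt
  rw [pv_alt_foldl]
  simp only [List.foldl_cons, List.foldl_nil, PySem.Str.replace, PySem.Str.strip,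
    String.toList_ofList]
  rw [show ("\n" : String).toList = ['\n'] from rfl,
      show ("\r" : String).toList = ['\r'] from rfl,
      show ("\r\n" : String).toList = ['\r', '\n'] from rfl,
      show ("\n\r" : String).toList = ['\n', '\r'] from rfl,
      show ("\u00A0" : String).toList = ['\u00A0'] from rfl,
      show ("\u3000" : String).toList = ['\u3000'] from rfl,
      show ("\t" : String).toList = ['\t'] from rfl,
      show (" " : String).toList = [' '] from rfl,
      show ("|" : String).toList = ['|'] from rfl,
      show ("" : String).toList = [] from rfl]
  rw [pv_chain]
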